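-- pv_equiv track=rewrite | github.com/DangUIT/Python- | Buoi2/4.py | check_gioi_tinh
-- ===== SOURCE A (Python) =====
-- def check_gioi_tinh(a):
--     name_male = []
--     name_female = []
--     for i in range(len(a)):
--         if a[i].endswith("lios") or a[i].endswith("etr") or a[i].endswith("initis"):
--             name_male.append(a[i])
--         if a[i].endswith("liala") or a[i].endswith("etra") or a[i].endswith("inites"):
--             name_female.append(a[i])
--     if name_male == a or name_female == a:
--         return "TRUE"
--     return "FALSE"
-- ===== SOURCE B (Python) =====
-- def check_gioi_tinh(a):
--     # Candidate-elimination: start with both genders possible, discard a gender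
--     # as soon as a name fails its suffix test, and stop early once none remain.
--     possible = {"M", "F"}
--     for name in a:
--         if not name.endswith(("lios", "etr", "initis")):
--             possible.discard("M")
--         if not name.endswith(("liala", "etra", "inites")):
--             possible.discard("F")
--         if not possible:
--             return "FALSE"
--     return "TRUE"
-- ===== Notes on version B (the rewrite author's own statement) =====
-- stated objective: simpler
-- what changed: B replaces A's two accumulated filtered lists and the final list-equality comparisons by candidate elimination: a set of still-possible genders shrinks as names fail the suffix tests, and the loop exits early the moment the set becomes empty.
import Mathlib
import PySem

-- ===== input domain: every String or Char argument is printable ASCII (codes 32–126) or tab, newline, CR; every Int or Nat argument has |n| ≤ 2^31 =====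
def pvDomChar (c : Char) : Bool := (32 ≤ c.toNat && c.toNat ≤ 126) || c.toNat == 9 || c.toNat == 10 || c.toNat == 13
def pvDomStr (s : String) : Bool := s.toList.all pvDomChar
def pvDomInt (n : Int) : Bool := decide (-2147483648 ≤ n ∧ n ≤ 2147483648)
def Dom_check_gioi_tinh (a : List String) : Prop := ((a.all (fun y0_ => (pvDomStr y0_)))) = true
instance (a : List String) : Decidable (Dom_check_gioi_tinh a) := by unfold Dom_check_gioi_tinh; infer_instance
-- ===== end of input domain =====

-- B replaces A's two accumulated filtered lists and list-equality test by candidate elimination: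
-- a shrinking set of still-possible genders with an early exit once it is empty (objective: simpler).


-- ===== PORT A =====
def pvMale (x : String) : Bool :=
  PySem.Str.endswith x "lios" || PySem.Str.endswith x "etr" || PySem.Str.endswith x "initis"

def pvFemale (x : String) : Bool :=
  PySem.Str.endswith x "liala" || PySem.Str.endswith x "etra" || PySem.Str.endswith x "inites"

-- the loop over range(len(a)) accessing a[i], appending to name_male / name_female
def check_gioi_tinh (a : List String) : String :=
  let st := a.foldl
    (fun (st : List String × List String) x =>
      (if pvMale x then st.1 ++ [x] else st.1,
       if pvFemale x then st.2 ++ [x] else st.2))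
    ([], [])
  if st.1 = a ∨ st.2 = a then "TRUE" else "FALSE"

-- ===== PORT B =====
-- Source B's loop body: discard "M" / "F" from the still-possible set, early-return "FALSE" once empty
def pvElim (possible : PySem.Set String) : List String → String
  | [] => "TRUE"
  | name :: rest =>
    let p1 := if !pvMale name then PySem.Set.discard possible "M" else possible
    let p2 := if !pvFemale name then PySem.Set.discard p1 "F" else p1
    if p2.isEmpty then "FALSE" else pvElim p2 rest

def check_gioi_tinh_alt (a : List String) : String :=
  pvElim (PySem.Set.ofList ["M", "F"]) a

-- ===== PRECONDITION & SPEC =====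
def Spec_check_gioi_tinh (a : List String) (out : String) : Prop := out = check_gioi_tinh_alt a
instance (a : List String) (out : String) : Decidable (Spec_check_gioi_tinh a out) := by unfold Spec_check_gioi_tinh; infer_instance

-- ===== CLAIM (what is proved, stated in full; the proofs are below) =====
def Claim_equal_check_gioi_tinh : Prop := ∀ (a : List String), Dom_check_gioi_tinh a → Spec_check_gioi_tinh a (check_gioi_tinh a)

-- ===== LEMMAS AND PROOFS =====
-- A's loop accumulators are the two filters of the input, prefixed by the initial accumulators
theorem pv_foldl_filter (a : List String) (m f : List String) :
    a.foldl
      (fun (st : List String × List String) x =>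
        (if pvMale x then st.1 ++ [x] else st.1,
         if pvFemale x then st.2 ++ [x] else st.2))
      (m, f)
    = (m ++ a.filter pvMale, f ++ a.filter pvFemale) := by
  induction a generalizing m f with
  | nil => simp
  | cons x xs ih =>
    simp only [List.foldl_cons, List.filter_cons, ih]
    by_cases hm : pvMale x <;> by_cases hf : pvFemale x <;> simp [hm, hf]

-- B's elimination loop, characterised for the three reachable nonempty candidate sets
theorem pvElim_eq (xs : List String) :
    ∀ p : PySem.Set String, (p = ["M", "F"] ∨ p = ["M"] ∨ p = ["F"]) →
      pvElim p xs
      = if (p.contains "M" && xs.all pvMale) || (p.contains "F" && xs.all pvFemale)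
        then "TRUE" else "FALSE" := by
  induction xs with
  | nil => rintro p (rfl | rfl | rfl) <;> decide
  | cons x xs ih =>
    have ihMF := ih ["M", "F"] (by tauto)
    have ihM := ih ["M"] (by tauto)
    have ihF := ih ["F"] (by tauto)
    rintro p (rfl | rfl | rfl) <;>
      by_cases hm : pvMale x <;> by_cases hf : pvFemale x <;>
        simp [pvElim, hm, hf, PySem.Set.discard, ihMF, ihM, ihF]

theorem pv_filter_all (q : String → Bool) (a : List String) :
    (a.filter q = a) ↔ (a.all q = true) :=
  ⟨fun he => List.all_eq_true.mpr (fun _ hx => List.of_mem_filter (he ▸ hx)),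
   fun hall => List.filter_eq_self.mpr (List.all_eq_true.mp hall)⟩

-- ===== VERDICT (by name: the statement is the Claim_ definition above) =====
theorem check_gioi_tinh_spec : Claim_equal_check_gioi_tinh := by
  intro a _
  unfold Spec_check_gioi_tinh check_gioi_tinh check_gioi_tinh_alt
  have h := pv_foldl_filter a [] []
  simp only [List.nil_append] at h
  rw [h]
  have hof : PySem.Set.ofList ["M", "F"] = (["M", "F"] : List String) := by decide
  rw [hof, pvElim_eq a ["M", "F"] (Or.inl rfl)]
  simp only [Bool.or_eq_true]
  exact if_congr (or_congr (pv_filter_all pvMale a) (pv_filter_all pvFemale a)) rfl rfl
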